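-- pv_equiv track=rewrite | github.com/t0r1n88/Lachesis | mental_state/shmelev_osr_razuvaeva.py | calc_value_d
-- ===== SOURCE A (Python) =====
-- def calc_value_d(row):
--     """
--     Функция для подсчета значения
--     :return: число
--     """
--     lst_pr = [12,14,20,22,27]
--     value_forward = 0  # результат
--     for idx, value in enumerate(row,1):
--         if idx in lst_pr:
--             if value == 1:
--                 value_forward += 1
--
--     return value_forward
-- ===== SOURCE B (Python) =====
-- def calc_value_d(row):
--     """
--     Функция для подсчета значения
--     :return: число
--     """
--     total = 0
--     for p in (12, 14, 20, 22, 27):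
--         if p <= len(row) and row[p - 1] == 1:
--             total += 1
--     return total
-- ===== Notes on version B (the rewrite author's own statement) =====
-- stated objective: faster
-- what changed: B checks the five fixed target positions directly (guarding against short rows) instead of scanning every row element with a membership test.
import Mathlib
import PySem

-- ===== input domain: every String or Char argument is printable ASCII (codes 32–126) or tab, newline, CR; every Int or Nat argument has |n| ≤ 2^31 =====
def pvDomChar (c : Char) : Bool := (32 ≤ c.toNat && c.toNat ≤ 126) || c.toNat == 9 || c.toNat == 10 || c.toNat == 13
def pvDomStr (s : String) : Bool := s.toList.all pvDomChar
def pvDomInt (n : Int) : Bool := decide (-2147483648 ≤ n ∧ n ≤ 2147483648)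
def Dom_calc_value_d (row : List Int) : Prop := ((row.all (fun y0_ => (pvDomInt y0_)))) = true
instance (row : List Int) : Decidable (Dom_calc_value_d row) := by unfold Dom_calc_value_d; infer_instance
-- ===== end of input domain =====

-- B checks the five fixed target positions directly (guarding short rows) instead of scanning every element; return-value equivalence.

-- ===== PORT A =====
-- lst_pr = [12,14,20,22,27]
def pvLstPr : List Int := [12, 14, 20, 22, 27]

-- for idx, value in enumerate(row, 1): if idx in lst_pr: if value == 1: value_forward += 1
def calc_value_d (row : List Int) : Int :=
  List.foldl
    (fun acc pr =>
      if pr.1 ∈ pvLstPr then (if pr.2 = 1 then acc + 1 else acc) else acc)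
    0 (PySem.List.enumerate row 1)

-- ===== PORT B =====
-- for p in (12,14,20,22,27): if p <= len(row) and row[p-1] == 1: total += 1
def calc_value_d_alt (row : List Int) : Int :=
  List.foldl
    (fun total p =>
      if p ≤ (row.length : Int) ∧ PySem.List.pyGet? row (p - 1) = some 1 then total + 1
      else total)
    0 pvLstPr

-- ===== PRECONDITION & SPEC =====
def Spec_calc_value_d (row : List Int) (out : Int) : Prop := out = calc_value_d_alt row
instance (row : List Int) (out : Int) : Decidable (Spec_calc_value_d row out) := by unfold Spec_calc_value_d; infer_instance

-- ===== CLAIM (what is proved, stated in full; the proofs are below) =====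
def Claim_equal_calc_value_d : Prop := ∀ (row : List Int), Dom_calc_value_d row → Spec_calc_value_d row (calc_value_d row)

-- ===== LEMMAS AND PROOFS =====

-- indicator of "1-based position p holds value 1", relative to current index s
def pvInd (s p : Nat) (l : List Int) : Int :=
  if s ≤ p ∧ l[p - s]? = some 1 then 1 else 0

def pvCount (s : Nat) (l : List Int) : Int :=
  pvInd s 12 l + pvInd s 14 l + pvInd s 20 l + pvInd s 22 l + pvInd s 27 l

theorem pvInd_nil (s p : Nat) : pvInd s p [] = 0 := by
  simp [pvInd]

theorem pvInd_cons (s p : Nat) (x : Int) (t : List Int) :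
    pvInd s p (x :: t) = (if s = p ∧ x = 1 then 1 else 0) + pvInd (s + 1) p t := by
  rcases lt_trichotomy s p with h | h | h
  · obtain ⟨k, rfl⟩ : ∃ k, p = s + (k + 1) := ⟨p - s - 1, by omega⟩
    have h1 : s + (k + 1) - s = k + 1 := by omega
    have h2 : s + (k + 1) - (s + 1) = k := by omega
    have h3 : ¬ s = s + (k + 1) := by omega
    have h4 : s + 1 ≤ s + (k + 1) := by omega
    have h5 : s ≤ s + (k + 1) := by omega
    simp [pvInd, h1, h2, h4, h5]
  · subst h
    have h1 : ¬ s + 1 ≤ s := by omega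
    simp [pvInd, h1]
  · have h1 : ¬ s ≤ p := by omega
    have h2 : ¬ s = p := by omega
    have h3 : ¬ s + 1 ≤ p := by omega
    simp [pvInd, h1, h2, h3]

-- the body of A's loop, rewritten as "old accumulator + indicator"
theorem pvStepA (acc : Int) (s : Int) (x : Int) :
    (if s ∈ pvLstPr then (if x = 1 then acc + 1 else acc) else acc)
      = acc + (if s ∈ pvLstPr ∧ x = 1 then 1 else 0) := by
  split_ifs <;> simp_all

-- one enumerate step contributes exactly the five per-position indicators
theorem pvHit (s : Nat) (x : Int) :
    (if (s : Int) ∈ pvLstPr ∧ x = 1 then (1 : Int) else 0)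
      = (if s = 12 ∧ x = 1 then 1 else 0) + (if s = 14 ∧ x = 1 then 1 else 0)
        + (if s = 20 ∧ x = 1 then 1 else 0) + (if s = 22 ∧ x = 1 then 1 else 0)
        + (if s = 27 ∧ x = 1 then 1 else 0) := by
  have hmem : ((s : Int) ∈ pvLstPr) ↔ (s = 12 ∨ s = 14 ∨ s = 20 ∨ s = 22 ∨ s = 27) := by
    simp [pvLstPr]; omega
  by_cases hx : x = 1
  · simp only [hx, and_true]
    by_cases hm : (s : Int) ∈ pvLstPr
    · rw [if_pos hm]
      rcases hmem.1 hm with h | h | h | h | h <;> subst h <;> norm_num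
    · rw [if_neg hm]
      have h' := hmem.not.1 hm
      push Not at h'
      simp [h'.1, h'.2.1, h'.2.2.1, h'.2.2.2.1, h'.2.2.2.2]
  · simp [hx]

theorem pvFoldA_eq (l : List Int) (s : Nat) (acc : Int) :
    List.foldl
      (fun acc pr =>
        if pr.1 ∈ pvLstPr then (if pr.2 = 1 then acc + 1 else acc) else acc)
      acc (PySem.List.enumerate l (s : Int)) = acc + pvCount s l := by
  induction l generalizing s acc with
  | nil => simp [PySem.List.enumerate_nil, pvCount, pvInd_nil]
  | cons x t ih =>
    rw [PySem.List.enumerate_cons]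
    have hs : ((s : Int) + 1) = ((s + 1 : Nat) : Int) := by push_cast; ring
    simp only [List.foldl_cons, hs, ih]
    rw [pvStepA, pvHit]
    simp only [pvCount, pvInd_cons]
    ring

-- B's per-position test equals the indicator (the length guard is implied by a hit)
theorem pvB_ind (p : Nat) (hp : 1 ≤ p) (row : List Int) :
    (if ((p : Int) ≤ (row.length : Int) ∧ PySem.List.pyGet? row ((p : Int) - 1) = some 1)
      then (1 : Int) else 0) = pvInd 1 p row := by
  have hc : ((p : Int) - 1) = ((p - 1 : Nat) : Int) := by omega
  have hget : PySem.List.pyGet? row ((p : Int) - 1) = row[p - 1]? := by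
    rw [hc, PySem.List.pyGet?_natCast]
  by_cases h : row[p - 1]? = some 1
  · have hlen : p - 1 < row.length := (List.getElem?_eq_some_iff.1 h).1
    have hle : (p : Int) ≤ (row.length : Int) := by omega
    simp [pvInd, h, hle, hp]
  · simp [pvInd, hget, h]

theorem pvB_eq (row : List Int) : calc_value_d_alt row = pvCount 1 row := by
  have step : ∀ (total p : Int),
      (if p ≤ (row.length : Int) ∧ PySem.List.pyGet? row (p - 1) = some 1 then total + 1
        else total)
      = total + (if p ≤ (row.length : Int) ∧ PySem.List.pyGet? row (p - 1) = some 1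
                  then (1 : Int) else 0) := by
    intro total p; split_ifs <;> ring
  have h12 := pvB_ind 12 (by omega) row
  have h14 := pvB_ind 14 (by omega) row
  have h20 := pvB_ind 20 (by omega) row
  have h22 := pvB_ind 22 (by omega) row
  have h27 := pvB_ind 27 (by omega) row
  norm_num at h12 h14 h20 h22 h27
  simp only [calc_value_d_alt, pvLstPr, List.foldl_cons, List.foldl_nil, step]
  norm_num [h12, h14, h20, h22, h27, pvCount]

-- ===== VERDICT (by name: the statement is the Claim_ definition above) =====
theorem calc_value_d_spec : Claim_equal_calc_value_d := by
  intro row _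
  unfold Spec_calc_value_d
  rw [pvB_eq]
  have h := pvFoldA_eq row 1 0
  norm_num at h
  simpa [calc_value_d] using h
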